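-- pv_equiv track=rewrite | github.com/pypi-data/pypi-code-130 | wwpdb.apps.seqmodule/wwpdb.apps.seqmodule-0.24.tar.gz/wwpdb/apps/seqmodule/control/SummaryView_v2.py | __checkPolyAlaAssignment
-- ===== SOURCE A (Python) =====
-- def __checkPolyAlaAssignment(seqAuth):
--     """Check if the sequence contains 10 or more consecutive ALA residues"""
--     has_consecutive_ALA = False
--     count = 0
--     for seqTupL in seqAuth:
--         if seqTupL[0] == "ALA":
--             count += 1
--         else:
--             if count > 9:
--                 has_consecutive_ALA = True
--             #
--             count = 0
--         #
--     #
--     if count > 9: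
--         has_consecutive_ALA = True
--     #
--     if count == len(seqAuth):
--         return 1
--     elif has_consecutive_ALA:
--         return 2
--     #
--     return 0
-- ===== SOURCE B (Python) =====
-- def __checkPolyAlaAssignment(seqAuth):
--     """Check if the sequence contains 10 or more consecutive ALA residues"""
--     keys = [seqTupL[0] == "ALA" for seqTupL in seqAuth]
--     if all(keys):
--         return 1
--     # run-length encode the key sequence, built back-to-front
--     runs = []
--     for k in reversed(keys):
--         if runs and runs[0][0] == k:
--             runs[0] = (k, runs[0][1] + 1)
--         else:
--             runs.insert(0, (k, 1))
--     best = 0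
--     for k, n in runs:
--         if k:
--             best = max(best, n)
--     return 2 if best >= 10 else 0
-- ===== Notes on version B (the rewrite author's own statement) =====
-- stated objective: alternative
-- what changed: replaces A's counter-with-reset loop and count==len quirk check by an all()-early-return plus an explicit run-length encoding of the ALA/non-ALA key sequence with a max over ALA run lengths
import Mathlib
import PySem

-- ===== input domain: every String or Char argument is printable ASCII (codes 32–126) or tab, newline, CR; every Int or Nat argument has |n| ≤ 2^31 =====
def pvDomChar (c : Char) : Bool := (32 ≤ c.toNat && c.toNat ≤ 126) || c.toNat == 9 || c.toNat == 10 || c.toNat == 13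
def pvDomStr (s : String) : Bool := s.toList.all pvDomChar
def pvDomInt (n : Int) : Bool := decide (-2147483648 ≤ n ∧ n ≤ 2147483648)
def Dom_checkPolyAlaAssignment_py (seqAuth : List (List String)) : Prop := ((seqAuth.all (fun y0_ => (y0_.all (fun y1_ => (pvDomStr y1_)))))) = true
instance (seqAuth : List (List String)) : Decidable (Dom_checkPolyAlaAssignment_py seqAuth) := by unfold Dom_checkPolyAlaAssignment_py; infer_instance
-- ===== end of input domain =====

-- B replaces A's counter-with-reset loop by an all() early return plus an explicit
-- run-length encoding of the ALA-key sequence with a max over ALA run lengths (alternative, same cost).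

-- ===== PORT A =====
-- seqTupL[0] is PySem.List.pyGet?; Pre_ excludes the empty inner lists on which Python raises
-- IndexError, so the .getD "" default is never reached on admitted inputs.
def checkPolyAlaAssignment_py (seqAuth : List (List String)) : Int :=
  let st := seqAuth.foldl
    (fun (p : Bool × Int) seqTupL =>
      if ((PySem.List.pyGet? seqTupL 0).getD "") == "ALA" then (p.1, p.2 + 1)
      else ((if p.2 > 9 then true else p.1), (0 : Int)))
    (false, 0)
  let has : Bool := if st.2 > 9 then true else st.1
  if st.2 = (seqAuth.length : Int) then 1
  else if has then 2
  else 0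

-- ===== PORT B =====
-- run-length encoding of the key list, built back-to-front (Source B's reversed-insert loop = foldr)
def pvRuns : List Bool → List (Bool × Int)
  | [] => []
  | k :: t =>
    match pvRuns t with
    | (k', n) :: r => if k = k' then (k, n + 1) :: r else (k, 1) :: (k', n) :: r
    | [] => [(k, 1)]

def checkPolyAlaAssignment_py_alt (seqAuth : List (List String)) : Int :=
  let keys := seqAuth.map (fun seqTupL => ((PySem.List.pyGet? seqTupL 0).getD "") == "ALA")
  if keys.all (fun k => k) then 1
  else
    let best := (pvRuns keys).foldl (fun b p => if p.1 then max b p.2 else b) (0 : Int)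
    if best ≥ 10 then 2 else 0

-- ===== PRECONDITION & SPEC =====
-- Pre_ excludes exactly the inputs containing an empty inner list, on which Python A (and B)
-- raise IndexError at seqTupL[0].
def Pre_checkPolyAlaAssignment_py (seqAuth : List (List String)) : Prop :=
  ∀ l ∈ seqAuth, l ≠ []
instance (seqAuth : List (List String)) : Decidable (Pre_checkPolyAlaAssignment_py seqAuth) := by
  unfold Pre_checkPolyAlaAssignment_py; infer_instance
def pvWitness_checkPolyAlaAssignment_py : List (List String) := [["ALA"], ["GLY"]]

def Spec_checkPolyAlaAssignment_py (seqAuth : List (List String)) (out : Int) : Prop := out = checkPolyAlaAssignment_py_alt seqAuth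
instance (seqAuth : List (List String)) (out : Int) : Decidable (Spec_checkPolyAlaAssignment_py seqAuth out) := by unfold Spec_checkPolyAlaAssignment_py; infer_instance

-- ===== CLAIM (what is proved, stated in full; the proofs are below) =====
def Claim_equal_checkPolyAlaAssignment_py : Prop := ∀ (seqAuth : List (List String)), Dom_checkPolyAlaAssignment_py seqAuth → Pre_checkPolyAlaAssignment_py seqAuth → Spec_checkPolyAlaAssignment_py seqAuth (checkPolyAlaAssignment_py seqAuth)

-- ===== LEMMAS AND PROOFS =====

-- A's loop, as structural recursion over the key list
def pvLoopA : List Bool → Bool → Int → Bool × Int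
  | [], h, c => (h, c)
  | k :: t, h, c =>
    if k then pvLoopA t h (c + 1) else pvLoopA t (if c > 9 then true else h) 0

theorem pvLoopA_eq_foldl (ks : List Bool) (h : Bool) (c : Int) :
    ks.foldl (fun (p : Bool × Int) k =>
      if k then (p.1, p.2 + 1) else ((if p.2 > 9 then true else p.1), (0 : Int))) (h, c)
      = pvLoopA ks h c := by
  induction ks generalizing h c with
  | nil => rfl
  | cons k t ih =>
    cases k
    · exact ih (if c > 9 then true else h) 0
    · exact ih h (c + 1)

theorem pvLoopA_snd_le (ks : List Bool) (h : Bool) (c : Int) (hc : 0 ≤ c) :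
    (pvLoopA ks h c).2 ≤ c + ks.length := by
  induction ks generalizing h c with
  | nil => simp [pvLoopA]
  | cons k t ih =>
    cases k
    · have h1 := ih (if c > 9 then true else h) 0 le_rfl
      have h2 : (pvLoopA (false :: t) h c).2 = (pvLoopA t (if c > 9 then true else h) 0).2 := rfl
      rw [h2]
      simp only [List.length_cons]
      push_cast
      omega
    · have h1 := ih h (c + 1) (by omega)
      have h2 : (pvLoopA (true :: t) h c).2 = (pvLoopA t h (c + 1)).2 := rfl
      rw [h2]
      simp only [List.length_cons]
      push_cast at h1 ⊢
      omega

theorem pvLoopA_count_iff (ks : List Bool) (h : Bool) (c : Int) (hc : 0 ≤ c) :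
    ((pvLoopA ks h c).2 = c + ks.length) ↔ ks.all (fun k => k) = true := by
  induction ks generalizing h c with
  | nil => simp [pvLoopA]
  | cons k t ih =>
    cases k
    · have h2 : (pvLoopA (false :: t) h c).2 = (pvLoopA t (if c > 9 then true else h) 0).2 := rfl
      have hle := pvLoopA_snd_le t (if c > 9 then true else h) 0 le_rfl
      rw [h2]
      simp only [List.all_cons, Bool.false_and, List.length_cons]
      push_cast at hle ⊢
      constructor
      · intro he; omega
      · intro he; cases he
    · have h2 : (pvLoopA (true :: t) h c).2 = (pvLoopA t h (c + 1)).2 := rfl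
      rw [h2]
      simp only [List.all_cons, Bool.true_and, List.length_cons]
      rw [← ih h (c + 1) (by omega)]
      push_cast
      constructor <;> intro he <;> omega

-- max run length of true-keys, with the current run extended by c
def pvMrun : List Bool → Int → Int
  | [], c => c
  | k :: t, c => if k then pvMrun t (c + 1) else max c (pvMrun t 0)

theorem pvLoopA_has (ks : List Bool) (h : Bool) (c : Int) :
    (if (pvLoopA ks h c).2 > 9 then true else (pvLoopA ks h c).1)
      = (h || decide (pvMrun ks c > 9)) := by
  induction ks generalizing h c with
  | nil =>
    simp only [pvLoopA, pvMrun]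
    by_cases hcc : c > 9 <;> simp [hcc]
  | cons k t ih =>
    cases k
    · have h2 : pvLoopA (false :: t) h c = pvLoopA t (if c > 9 then true else h) 0 := rfl
      have h3 : pvMrun (false :: t) c = max c (pvMrun t 0) := rfl
      rw [h2, h3, ih (if c > 9 then true else h) 0]
      by_cases hcc : c > 9 <;> simp [hcc]
    · have h2 : pvLoopA (true :: t) h c = pvLoopA t h (c + 1) := rfl
      have h3 : pvMrun (true :: t) c = pvMrun t (c + 1) := rfl
      rw [h2, h3, ih h (c + 1)]

def pvMaxT (b : Int) (l : List (Bool × Int)) : Int :=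
  l.foldl (fun b p => if p.1 then max b p.2 else b) b

theorem pvMaxT_cons (b : Int) (p : Bool × Int) (l : List (Bool × Int)) :
    pvMaxT b (p :: l) = pvMaxT (if p.1 then max b p.2 else b) l := rfl

theorem pvMaxT_max (l : List (Bool × Int)) (b c : Int) :
    pvMaxT (max b c) l = max b (pvMaxT c l) := by
  induction l generalizing b c with
  | nil => simp [pvMaxT]
  | cons p r ih =>
    rw [pvMaxT_cons, pvMaxT_cons]
    by_cases hp : p.1 = true
    · rw [if_pos hp, if_pos hp, max_assoc, ih]
    · rw [if_neg hp, if_neg hp, ih]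

theorem pvMaxT_false (b n : Int) (l : List (Bool × Int)) :
    pvMaxT b ((false, n) :: l) = pvMaxT b l := rfl

theorem pvMaxT_true (n : Int) (l : List (Bool × Int)) (hn : 0 ≤ n) :
    pvMaxT 0 ((true, n) :: l) = max n (pvMaxT 0 l) := by
  have h : pvMaxT 0 ((true, n) :: l) = pvMaxT (max 0 n) l := rfl
  rw [h, show max (0 : Int) n = max n 0 by omega, pvMaxT_max]

theorem pvRuns_pos (ks : List Bool) : ∀ p ∈ pvRuns ks, 1 ≤ p.2 := by
  induction ks with
  | nil => simp [pvRuns]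
  | cons k t ih =>
    intro p hp
    simp only [pvRuns] at hp
    rcases hr : pvRuns t with _ | ⟨⟨k', n⟩, r⟩ <;> rw [hr] at hp
    · change p ∈ [(k, 1)] at hp
      simp only [List.mem_singleton] at hp
      rw [hp]
    · change p ∈ (if k = k' then (k, n + 1) :: r else (k, 1) :: (k', n) :: r) at hp
      have hn : 1 ≤ n := by
        simpa using ih (k', n) (by rw [hr]; exact List.mem_cons_self ..)
      by_cases hkk : k = k'
      · rw [if_pos hkk] at hp
        rcases List.mem_cons.mp hp with hp | hp
        · rw [hp]; show 1 ≤ n + 1; omega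
        · exact ih p (by rw [hr]; exact List.mem_cons_of_mem _ hp)
      · rw [if_neg hkk] at hp
        rcases List.mem_cons.mp hp with hp | hp
        · rw [hp]
        · rcases List.mem_cons.mp hp with hp | hp
          · rw [hp]; exact hn
          · exact ih p (by rw [hr]; exact List.mem_cons_of_mem _ hp)

theorem pvMaxT_nonneg (l : List (Bool × Int)) (b : Int) (hb : 0 ≤ b) : 0 ≤ pvMaxT b l := by
  induction l generalizing b with
  | nil => simpa [pvMaxT]
  | cons p r ih =>
    rw [pvMaxT_cons]
    by_cases hp : p.1 = true
    · rw [if_pos hp]; exact ih _ (le_trans hb (le_max_left _ _))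
    · rw [if_neg hp]; exact ih _ hb

theorem pvMrun_eq_runs (ks : List Bool) (c : Int) (hc : 0 ≤ c) :
    pvMrun ks c =
      match pvRuns ks with
      | (true, n) :: r => max (c + n) (pvMaxT 0 r)
      | l => max c (pvMaxT 0 l) := by
  induction ks generalizing c with
  | nil => simp [pvMrun, pvRuns, pvMaxT, max_eq_left hc]
  | cons k t ih =>
    have hpos := pvRuns_pos t
    cases k
    · have h3 : pvMrun (false :: t) c = max c (pvMrun t 0) := rfl
      rw [h3, ih 0 le_rfl]
      rcases hr : pvRuns t with _ | ⟨⟨k', n⟩, r⟩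
      · simp [pvRuns, hr, pvMaxT]
      · have hn : 1 ≤ n := by
          simpa using hpos (k', n) (by rw [hr]; exact List.mem_cons_self ..)
        have hnn := pvMaxT_nonneg r 0 le_rfl
        cases k'
        · have hpr : pvRuns (false :: t) = (false, n + 1) :: r := by simp [pvRuns, hr]
          rw [hpr]
          show max c (max 0 (pvMaxT 0 ((false, n) :: r))) = max c (pvMaxT 0 ((false, n + 1) :: r))
          rw [pvMaxT_false, pvMaxT_false, max_eq_right hnn]
        · have hpr : pvRuns (false :: t) = (false, 1) :: (true, n) :: r := by simp [pvRuns, hr]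
          have ht := pvMaxT_true n r (by omega)
          rw [hpr]
          show max c (max (0 + n) (pvMaxT 0 r)) = max c (pvMaxT 0 ((false, 1) :: (true, n) :: r))
          rw [pvMaxT_false, ht, zero_add]
    · have h3 : pvMrun (true :: t) c = pvMrun t (c + 1) := rfl
      rw [h3, ih (c + 1) (by omega)]
      rcases hr : pvRuns t with _ | ⟨⟨k', n⟩, r⟩
      · have hpr : pvRuns (true :: t) = [(true, 1)] := by simp [pvRuns, hr]
        rw [hpr]
      · have hn : 1 ≤ n := by
          simpa using hpos (k', n) (by rw [hr]; exact List.mem_cons_self ..)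
        cases k'
        · have hpr : pvRuns (true :: t) = (true, 1) :: (false, n) :: r := by simp [pvRuns, hr]
          rw [hpr]
        · have hpr : pvRuns (true :: t) = (true, n + 1) :: r := by simp [pvRuns, hr]
          rw [hpr]
          show max (c + 1 + n) (pvMaxT 0 r) = max (c + (n + 1)) (pvMaxT 0 r)
          ring_nf

theorem pvMrun_zero (ks : List Bool) :
    pvMrun ks 0 = pvMaxT 0 (pvRuns ks) := by
  rw [pvMrun_eq_runs ks 0 le_rfl]
  rcases hr : pvRuns ks with _ | ⟨⟨k, n⟩, r⟩
  · simp [pvMaxT]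
  · have hn : 1 ≤ n := by
      simpa using pvRuns_pos ks (k, n) (by rw [hr]; exact List.mem_cons_self ..)
    cases k
    · show max 0 (pvMaxT 0 ((false, n) :: r)) = pvMaxT 0 ((false, n) :: r)
      rw [pvMaxT_false]
      exact max_eq_right (pvMaxT_nonneg r 0 le_rfl)
    · show max (0 + n) (pvMaxT 0 r) = pvMaxT 0 ((true, n) :: r)
      rw [pvMaxT_true n r (by omega), zero_add]

-- ===== VERDICT (by name: the statement is the Claim_ definition above) =====
theorem checkPolyAlaAssignment_py_spec : Claim_equal_checkPolyAlaAssignment_py := by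
  intro seqAuth _ _
  unfold Spec_checkPolyAlaAssignment_py checkPolyAlaAssignment_py checkPolyAlaAssignment_py_alt
  simp only []
  have hfold : seqAuth.foldl
      (fun (p : Bool × Int) seqTupL =>
        if ((PySem.List.pyGet? seqTupL 0).getD "") == "ALA" then (p.1, p.2 + 1)
        else ((if p.2 > 9 then true else p.1), (0 : Int)))
      (false, 0)
      = pvLoopA (seqAuth.map (fun seqTupL => ((PySem.List.pyGet? seqTupL 0).getD "") == "ALA")) false 0 := by
    rw [← pvLoopA_eq_foldl, List.foldl_map]
  rw [hfold]
  set ks := seqAuth.map (fun seqTupL => ((PySem.List.pyGet? seqTupL 0).getD "") == "ALA") with hks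
  have hlen : (ks.length : Int) = (seqAuth.length : Int) := by simp [hks]
  by_cases hall : ks.all (fun k => k) = true
  · have hc : (pvLoopA ks false 0).2 = (seqAuth.length : Int) := by
      rw [← hlen]
      have := (pvLoopA_count_iff ks false 0 le_rfl).mpr hall
      omega
    rw [if_pos hc, if_pos hall]
  · have hc : (pvLoopA ks false 0).2 ≠ (seqAuth.length : Int) := by
      rw [← hlen]
      intro h
      exact hall ((pvLoopA_count_iff ks false 0 le_rfl).mp (by omega))
    have hhas := pvLoopA_has ks false 0
    rw [pvMrun_zero] at hhas
    simp only [pvMaxT] at hhas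
    rw [if_neg hc, if_neg hall, hhas]
    simp only [Bool.false_or, decide_eq_true_eq]
    split_ifs with h1 h2 <;> omega
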